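-- pv_equiv track=rewrite | github.com/yannick-tchoukouani/runtrack-python | JOUR 04/JOB 14/14.py | my_long_word
-- ===== SOURCE A (Python) =====
-- def my_long_word(longueur_minimale, phrase):
--     mots = []
--     mot_actuel = ""
--
--     for caractere in phrase:
--         if caractere.isalnum():
--             mot_actuel += caractere
--         elif mot_actuel:
--             if len(mot_actuel) > longueur_minimale:
--                 mots.append(mot_actuel)
--             mot_actuel = ""
--
--     # Vérifier le dernier mot de la phrase
--     if mot_actuel and len(mot_actuel) > longueur_minimale:
--         mots.append(mot_actuel)
--
--     return " ".join(mots)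
-- ===== SOURCE B (Python) =====
-- def my_long_word(longueur_minimale, phrase):
--     cleaned = ''.join(c if c.isalnum() else ' ' for c in phrase)
--     return ' '.join(w for w in cleaned.split() if len(w) > longueur_minimale)
-- ===== Notes on version B (the rewrite author's own statement) =====
-- stated objective: idiomatic
-- what changed: A's single scan that accumulates a current word and filters inline is replaced by tokenize-then-filter: map every non-alphanumeric character to a space, split() the cleaned string into words in one library call, then filter by length and join.
import Mathlib
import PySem

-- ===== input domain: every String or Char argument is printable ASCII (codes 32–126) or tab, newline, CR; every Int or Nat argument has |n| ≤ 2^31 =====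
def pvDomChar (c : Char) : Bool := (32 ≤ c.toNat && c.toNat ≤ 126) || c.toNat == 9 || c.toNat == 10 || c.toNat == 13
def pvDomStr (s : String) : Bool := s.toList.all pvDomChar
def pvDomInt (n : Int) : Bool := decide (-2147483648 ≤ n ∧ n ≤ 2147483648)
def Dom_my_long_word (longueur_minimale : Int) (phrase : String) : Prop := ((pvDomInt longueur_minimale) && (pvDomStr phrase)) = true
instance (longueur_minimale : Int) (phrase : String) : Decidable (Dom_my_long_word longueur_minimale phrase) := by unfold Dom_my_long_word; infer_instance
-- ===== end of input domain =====

-- B replaces A's inline accumulate-and-filter scan by an idiomatic tokenize-then-filter: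
-- map non-alphanumerics to spaces, str.split(), filter by length, join (objective: idiomatic).


-- ===== PORT A =====
-- A's loop body over (mots, mot_actuel); words kept as List Char, final " ".join via PySem.Chars.join.
def my_long_word_step (longueur_minimale : Int) (p : List (List Char) × List Char) (c : Char) : List (List Char) × List Char :=
  if PySem.Chars.isalnum c then (p.1, p.2 ++ [c])
  else if !p.2.isEmpty then
    (if longueur_minimale < (p.2.length : Int) then p.1 ++ [p.2] else p.1, [])
  else p

-- A's check of the last word after the loop
def my_long_word_fin (longueur_minimale : Int) (p : List (List Char) × List Char) : List (List Char) :=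
  if !p.2.isEmpty && decide (longueur_minimale < (p.2.length : Int)) then p.1 ++ [p.2] else p.1

def my_long_word (longueur_minimale : Int) (phrase : String) : String :=
  String.ofList (PySem.Chars.join [' ']
    (my_long_word_fin longueur_minimale (phrase.toList.foldl (my_long_word_step longueur_minimale) ([], []))))

-- ===== PORT B =====
def my_long_word_alt (longueur_minimale : Int) (phrase : String) : String :=
  let cleaned := phrase.toList.map (fun c => if PySem.Chars.isalnum c then c else ' ')
  let words := PySem.Chars.split₀ cleaned
  String.ofList (PySem.Chars.join [' '] (words.filter (fun w => decide (longueur_minimale < (w.length : Int)))))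

-- ===== PRECONDITION & SPEC =====
def Spec_my_long_word (longueur_minimale : Int) (phrase : String) (out : String) : Prop := out = my_long_word_alt longueur_minimale phrase
instance (longueur_minimale : Int) (phrase : String) (out : String) : Decidable (Spec_my_long_word longueur_minimale phrase out) := by unfold Spec_my_long_word; infer_instance

-- ===== CLAIM (what is proved, stated in full; the proofs are below) =====
def Claim_equal_my_long_word : Prop := ∀ (longueur_minimale : Int) (phrase : String), Dom_my_long_word longueur_minimale phrase → Spec_my_long_word longueur_minimale phrase (my_long_word longueur_minimale phrase)

-- ===== LEMMAS AND PROOFS =====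

-- an alphanumeric character is not Python whitespace
theorem mlw_alnum_not_space (c : Char) (h : PySem.Chars.isalnum c = true) :
    PySem.Chars.isspace c = false := by
  have h1 : ('A' ≤ c ∧ c ≤ 'Z') ∨ ('a' ≤ c ∧ c ≤ 'z') ∨ ('0' ≤ c ∧ c ≤ '9') := by
    simpa [PySem.Chars.isalnum, PySem.Chars.isalpha, PySem.Chars.isdigit,
        PySem.Chars.isupper, PySem.Chars.islower, and_assoc, or_assoc] using h
  simp only [Char.le_def, UInt32.le_iff_toNat_le] at h1
  have hA : ('A'.val).toNat = 65 := rfl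
  have hZ : ('Z'.val).toNat = 90 := rfl
  have ha : ('a'.val).toNat = 97 := rfl
  have hz : ('z'.val).toNat = 122 := rfl
  have h0 : ('0'.val).toNat = 48 := rfl
  have h9 : ('9'.val).toNat = 57 := rfl
  rw [hA, hZ, ha, hz, h0, h9] at h1
  have hc : c.toNat = c.val.toNat := rfl
  simp only [PySem.Chars.isspace]
  simp only [Bool.or_eq_false_iff, Bool.and_eq_false_iff, decide_eq_false_iff_not, hc]
  omega

theorem mlw_space : PySem.Chars.isspace ' ' = true := by decide

-- split₀.go's output accumulator splits off
theorem mlw_go_acc (cs : List Char) (cur : List Char) (acc : List (List Char)) :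
    PySem.Chars.split₀.go cs cur acc = acc.reverse ++ PySem.Chars.split₀.go cs cur [] := by
  induction cs generalizing cur acc with
  | nil => simp [PySem.Chars.split₀.go]; split <;> simp
  | cons c rest ih =>
    simp only [PySem.Chars.split₀.go]
    split
    · split
      · exact ih _ _
      · rw [ih _ (cur.reverse :: acc), ih _ [cur.reverse]]; simp
    · exact ih _ _

-- main invariant: A's fold with pending word `cur` against B's split of the cleaned tail
theorem mlw_main (lm : Int) (cs : List Char) (mots : List (List Char)) (cur : List Char) :
    my_long_word_fin lm (cs.foldl (my_long_word_step lm) (mots, cur))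
    = mots ++ (PySem.Chars.split₀.go (cs.map (fun c => if PySem.Chars.isalnum c then c else ' ')) cur.reverse []).filter
        (fun w => decide (lm < (w.length : Int))) := by
  induction cs generalizing mots cur with
  | nil =>
    simp only [List.foldl_nil, List.map_nil, PySem.Chars.split₀.go, my_long_word_fin]
    by_cases h : cur = [] <;> simp [h] <;> split <;> simp_all
  | cons c rest ih =>
    rw [List.foldl_cons, List.map_cons]
    by_cases ha : PySem.Chars.isalnum c = true
    · rw [show my_long_word_step lm (mots, cur) c = (mots, cur ++ [c]) by
        simp [my_long_word_step, ha]]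
      rw [show (if PySem.Chars.isalnum c then c else ' ') = c from if_pos ha]
      rw [show PySem.Chars.split₀.go (c :: rest.map _) cur.reverse [] =
          PySem.Chars.split₀.go (rest.map (fun c => if PySem.Chars.isalnum c then c else ' ')) (c :: cur.reverse) [] by
        simp [PySem.Chars.split₀.go, mlw_alnum_not_space c ha]]
      have h2 := ih mots (cur ++ [c])
      simpa using h2
    · rw [show (if PySem.Chars.isalnum c then c else ' ') = ' ' from if_neg (by simp [ha])]
      by_cases hc : cur = []
      · subst hc
        rw [show my_long_word_step lm (mots, []) c = (mots, []) by
          simp [my_long_word_step, ha]]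
        rw [show PySem.Chars.split₀.go (' ' :: rest.map _) [].reverse [] =
            PySem.Chars.split₀.go (rest.map (fun c => if PySem.Chars.isalnum c then c else ' ')) [] [] by
          simp [PySem.Chars.split₀.go, mlw_space]]
        exact ih mots []
      · rw [show my_long_word_step lm (mots, cur) c =
            ((if lm < (cur.length : Int) then mots ++ [cur] else mots), []) by
          simp [my_long_word_step, ha, hc]]
        rw [show PySem.Chars.split₀.go (' ' :: rest.map _) cur.reverse [] =
            [cur] ++ PySem.Chars.split₀.go (rest.map (fun c => if PySem.Chars.isalnum c then c else ' ')) [] [] by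
          rw [PySem.Chars.split₀.go]
          rw [if_pos mlw_space, if_neg (by simp [hc])]
          rw [mlw_go_acc _ [] [cur.reverse.reverse]]
          simp]
        rw [ih (if lm < (cur.length : Int) then mots ++ [cur] else mots) []]
        simp only [List.reverse_nil, List.filter_append, List.filter_cons, List.filter_nil]
        split <;> simp_all

-- ===== VERDICT (by name: the statement is the Claim_ definition above) =====
theorem my_long_word_spec : Claim_equal_my_long_word := by
  intro lm phrase _
  unfold Spec_my_long_word my_long_word my_long_word_alt PySem.Chars.split₀
  have h := mlw_main lm phrase.toList [] []
  simp only [List.reverse_nil] at h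
  simp only [h, List.nil_append]
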